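-- pv_equiv track=rewrite | github.com/cavanegas/MLOpsWorldCup2026 | src/worldcup2026/simulation/tournament.py | _serpentine_groups
-- ===== SOURCE A (Python) =====
-- def _serpentine_groups(teams: list[str], n_groups: int = 12) -> list[list[str]]:
--     """Distribute a seeded team list into N groups, snaking through seed bands."""
--     groups: list[list[str]] = [[] for _ in range(n_groups)]
--     for i, team in enumerate(teams):
--         band = i // n_groups
--         idx = i % n_groups
--         if band % 2 == 1:
--             idx = n_groups - 1 - idx
--         groups[idx].append(team)
--     return groups
-- ===== SOURCE B (Python) =====
-- def _serpentine_groups(teams: list[str], n_groups: int = 12) -> list[list[str]]: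
--     """Distribute a seeded team list into N groups, snaking through seed bands."""
--     groups: list[list[str]] = [[] for _ in range(n_groups)]
--     b = 0
--     rest = teams
--     while rest:
--         chunk, rest = rest[:n_groups], rest[n_groups:]
--         for j, t in enumerate(chunk):
--             g = j if b % 2 == 0 else n_groups - 1 - j
--             groups[g].append(t)
--         b += 1
--     return groups
-- ===== Notes on version B (the rewrite author's own statement) =====
-- stated objective: alternative
-- what changed: Replaces the flat enumerate pass with //- and %-arithmetic per element by an outer while-loop that slices teams into bands of n_groups and an inner enumeration of each band's seats, choosing groups[j] or groups[n_groups-1-j] by band parity.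
import Mathlib
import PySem

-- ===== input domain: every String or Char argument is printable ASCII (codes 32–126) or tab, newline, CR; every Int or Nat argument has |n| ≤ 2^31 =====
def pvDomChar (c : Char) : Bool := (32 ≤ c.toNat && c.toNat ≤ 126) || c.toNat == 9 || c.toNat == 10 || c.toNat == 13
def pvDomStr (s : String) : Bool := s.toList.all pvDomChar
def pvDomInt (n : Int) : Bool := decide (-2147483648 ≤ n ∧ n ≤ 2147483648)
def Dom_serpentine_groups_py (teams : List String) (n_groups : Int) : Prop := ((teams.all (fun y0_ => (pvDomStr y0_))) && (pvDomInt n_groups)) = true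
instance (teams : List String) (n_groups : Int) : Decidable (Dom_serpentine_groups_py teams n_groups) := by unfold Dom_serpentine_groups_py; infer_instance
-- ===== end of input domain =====

-- B restructures A's flat modular-arithmetic pass into an outer while-loop over seed bands
-- with an inner per-seat enumeration (alternative decomposition, same cost).

-- groups[g].append(t)  (shared step of both Pythons)
def sgAppend (gs : List (List String)) (g : Int) (t : String) : List (List String) :=
  PySem.List.pySetD gs g (PySem.List.pyGetD gs g [] ++ [t])

-- ===== PORT A =====
-- body of A's for-loop over enumerate(teams)
def aStep (n : Int) (gs : List (List String)) (it : Int × String) : List (List String) :=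
  let band := PySem.Int.floordiv it.1 n
  let idx0 := PySem.Int.mod it.1 n
  let idx := if PySem.Int.mod band 2 = 1 then n - 1 - idx0 else idx0
  sgAppend gs idx it.2

def serpentine_groups_py (teams : List String) (n_groups : Int) : List (List String) :=
  let groups : List (List String) := (PySem.List.pyRange 0 n_groups 1).map (fun _ => [])
  (PySem.List.enumerate teams 0).foldl (aStep n_groups) groups

-- ===== PORT B =====
-- inner loop: for j, t in enumerate(chunk): groups[j if b%2==0 else n-1-j].append(t)
def sgBand (n b : Int) (gs : List (List String)) (chunk : List String) : List (List String) :=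
  (PySem.List.enumerate chunk 0).foldl
    (fun gs jt => sgAppend gs (if PySem.Int.mod b 2 = 0 then jt.1 else n - 1 - jt.1) jt.2) gs

-- while rest: chunk, rest = rest[:n], rest[n:]; <inner loop>; b += 1
-- (fuel bounds the iteration count; with Pre_ each pass strictly shrinks rest, so
--  fuel = teams.length is never exhausted on admitted inputs)
def sgLoop (n : Int) : Nat → Int → List (List String) → List String → List (List String)
  | _, _, gs, [] => gs
  | 0, _, gs, _ :: _ => gs
  | fuel + 1, b, gs, x :: rest =>
      sgLoop n fuel (b + 1)
        (sgBand n b gs (PySem.List.slice (x :: rest) none (some n)))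
        (PySem.List.slice (x :: rest) (some n) none)

def serpentine_groups_py_alt (teams : List String) (n_groups : Int) : List (List String) :=
  let groups : List (List String) := (PySem.List.pyRange 0 n_groups 1).map (fun _ => [])
  sgLoop n_groups teams.length 0 groups teams

-- ===== PRECONDITION & SPEC =====
-- Pre_ excludes only inputs where A raises: with n_groups ≤ 0 and a nonempty teams list,
-- A hits ZeroDivisionError (n_groups = 0) or IndexError (groups is empty); A returns on
-- every admitted input.
def Pre_serpentine_groups_py (teams : List String) (n_groups : Int) : Prop :=
  1 ≤ n_groups ∨ teams = []
instance (teams : List String) (n_groups : Int) : Decidable (Pre_serpentine_groups_py teams n_groups) := by unfold Pre_serpentine_groups_py; infer_instance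

def pvWitness_serpentine_groups_py : List String × Int := (["a", "b", "c", "d", "e"], 2)

def Spec_serpentine_groups_py (teams : List String) (n_groups : Int) (out : List (List String)) : Prop := out = serpentine_groups_py_alt teams n_groups
instance (teams : List String) (n_groups : Int) (out : List (List String)) : Decidable (Spec_serpentine_groups_py teams n_groups out) := by unfold Spec_serpentine_groups_py; infer_instance

-- ===== CLAIM (what is proved, stated in full; the proofs are below) =====
def Claim_equal_serpentine_groups_py : Prop := ∀ (teams : List String) (n_groups : Int), Dom_serpentine_groups_py teams n_groups → Pre_serpentine_groups_py teams n_groups → Spec_serpentine_groups_py teams n_groups (serpentine_groups_py teams n_groups)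

-- ===== LEMMAS AND PROOFS =====

-- A's step on global index b*n + j equals B's inner step on seat j of band b.
lemma aStep_eq_band_step (n b j : Int) (hn : 1 ≤ n) (hj : 0 ≤ j) (hjn : j < n)
    (gs : List (List String)) (t : String) :
    aStep n gs (b * n + j, t)
      = sgAppend gs (if PySem.Int.mod b 2 = 0 then j else n - 1 - j) t := by
  have hdiv : PySem.Int.floordiv (b * n + j) n = b := by
    rw [PySem.Int.floordiv_eq_iff_of_pos (by omega)]
    constructor <;> nlinarith
  have hmod : PySem.Int.mod (b * n + j) n = j := by
    have := PySem.Int.floordiv_mul_add_mod (b * n + j) n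
    rw [hdiv] at this; omega
  unfold aStep
  simp only [hdiv, hmod]
  rcases PySem.Int.mod_two_eq b with h | h <;> simp only [h] <;> norm_num

-- one band: A's fold over enumerate chunk (b*n + j) equals B's inner fold from seat j
lemma band_eq (n b : Int) (hn : 1 ≤ n) :
    ∀ (chunk : List String) (j : Int) (gs : List (List String)),
      0 ≤ j → j + chunk.length ≤ n →
      (PySem.List.enumerate chunk (b * n + j)).foldl (aStep n) gs
        = (PySem.List.enumerate chunk j).foldl
            (fun gs jt => sgAppend gs (if PySem.Int.mod b 2 = 0 then jt.1 else n - 1 - jt.1) jt.2) gs := by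
  intro chunk
  induction chunk with
  | nil => intro j gs _ _; simp [PySem.List.enumerate_nil]
  | cons x xs ih =>
      intro j gs hj hlen
      rw [PySem.List.enumerate_cons, PySem.List.enumerate_cons, List.foldl_cons, List.foldl_cons]
      have hxlen : (j : Int) < n := by
        have := hlen; simp [List.length_cons] at this; omega
      rw [aStep_eq_band_step n b j hn hj hxlen]
      have harith : b * n + j + 1 = b * n + (j + 1) := by ring
      rw [harith]
      exact ih (j + 1) _ (by omega) (by simp [List.length_cons] at hlen ⊢; omega)

-- B's band-by-band loop computes A's single fold over enumerate teams.
lemma loop_eq (n : Int) (hn : 1 ≤ n) :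
    ∀ (fuel : Nat) (rest : List String), rest.length ≤ fuel →
    ∀ (b : Int), 0 ≤ b → ∀ (gs : List (List String)),
      sgLoop n fuel b gs rest = (PySem.List.enumerate rest (b * n)).foldl (aStep n) gs := by
  intro fuel
  induction fuel with
  | zero =>
      intro rest hlen b hb gs
      have : rest = [] := by cases rest <;> simp_all
      subst this; simp [sgLoop, PySem.List.enumerate_nil]
  | succ fuel ih =>
      intro rest hlen b hb gs
      cases rest with
      | nil => simp [sgLoop, PySem.List.enumerate_nil]
      | cons x rs =>
          have hncast : n = ((n.toNat : Nat) : Int) := by omega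
          have hchunk : PySem.List.slice (x :: rs) none (some n) = (x :: rs).take n.toNat := by
            rw [hncast]; exact PySem.List.slice_to_natCast _ _
          have hrest : PySem.List.slice (x :: rs) (some n) none = (x :: rs).drop n.toNat := by
            rw [hncast]; exact PySem.List.slice_from_natCast _ _
          have hsplit : (x :: rs) = (x :: rs).take n.toNat ++ (x :: rs).drop n.toNat :=
            (List.take_append_drop _ _).symm
          rw [sgLoop, hchunk, hrest]
          conv_rhs => rw [hsplit]
          rw [PySem.List.enumerate_append, List.foldl_append]
          have hlentake : ((x :: rs).take n.toNat).length = min n.toNat (x :: rs).length := by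
            simp
          have hband : (PySem.List.enumerate ((x :: rs).take n.toNat) (b * n)).foldl (aStep n) gs
              = sgBand n b gs ((x :: rs).take n.toNat) := by
            have h0 : b * n = b * n + 0 := by ring
            rw [h0, band_eq n b hn _ 0 gs le_rfl (by rw [hlentake]; push_cast; omega)]
            rfl
          rw [hband]
          by_cases hcase : (x :: rs).length ≤ n.toNat
          · have hdropnil : (x :: rs).drop n.toNat = [] := by
              have h2 : (x :: rs).length ≤ n.toNat := hcase
              rw [List.drop_eq_nil_iff]
              omega
            rw [hdropnil]
            cases fuel <;> simp [sgLoop, PySem.List.enumerate_nil]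
          · have hlen' : ((x :: rs).drop n.toNat).length ≤ fuel := by
              simp [List.length_drop] at *; omega
            rw [ih _ hlen' (b + 1) (by omega)]
            have hfull0 : ((List.take n.toNat (x :: rs)).length : Int) = n := by
              rw [hlentake]; push_cast; omega
            rw [hfull0, show b * n + n = (b + 1) * n by ring]

-- ===== VERDICT (by name: the statement is the Claim_ definition above) =====
theorem serpentine_groups_py_spec : Claim_equal_serpentine_groups_py := by
  intro teams n _ hpre
  unfold Spec_serpentine_groups_py serpentine_groups_py serpentine_groups_py_alt
  rcases hpre with hn | rfl
  · rw [loop_eq n hn teams.length teams le_rfl 0 le_rfl]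
    norm_num
  · cases n <;> rfl
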